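-- pv_equiv track=rewrite | github.com/aitelkob/N-Puzzle | generator.py | Puzzle_goal
-- ===== SOURCE A (Python) =====
-- def Puzzle_goal(size):
--     puzzle = []
--     for number in range(0, size):
--         puzzle.append([0] * size)
--
--     i, j = 0, 0
--     number = 0
--     xsize = size - 1
--     ysize = size - 1
--     magic = 0
--     while magic < size:
--         i = magic
--         j = magic
--         while j <= ysize - magic:
--             puzzle[i][j] = number + 1
--             number += 1
--             j += 1
--         i += 1
--         j -= 1
--         while i <= xsize - magic:
--             puzzle[i][j] = number + 1
--             number += 1
--             i += 1
--         j -= 1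
--         i -= 1
--         while j >= magic:
--             puzzle[i][j] = number + 1
--             number += 1
--             j -= 1
--         j += 1
--         i -= 1
--         while i > magic:
--             puzzle[i][j] = number + 1
--             number += 1
--             i -= 1
--         magic += 1
--
--     i, j = 0, 0
--     while i < size:
--         j = 0
--         while j < size:
--             if puzzle[i][j] == (size * size):
--                 puzzle[i][j] = 0
--             j += 1
--         i += 1
--     return puzzle
-- ===== SOURCE B (Python) =====
-- def Puzzle_goal(size):
--     # Closed-form: compute each cell's spiral value directly from its ring
--     # index m = min(i, j, size-1-i, size-1-j) and its offset along that ring;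
--     # the cell whose value would be size*size holds the blank (0).
--     def val(i, j):
--         m = min(i, j, size - 1 - i, size - 1 - j)
--         L = size - 1 - 2 * m
--         if i == m:
--             off = j - m
--         elif j == size - 1 - m:
--             off = L + (i - m)
--         elif i == size - 1 - m:
--             off = 2 * L + (size - 1 - m - j)
--         else:
--             off = 3 * L + (size - 1 - m - i)
--         v = 4 * m * (size - m) + off + 1
--         return 0 if v == size * size else v
--     return [[val(i, j) for j in range(size)] for i in range(size)]
-- ===== Notes on version B (the rewrite author's own statement) =====
-- stated objective: alternative
-- what changed: Replaces A's imperative spiral fill (four while-loops per ring mutating a zero matrix, then a full rescan to blank the cell holding size*size) by a closed-form per-cell formula: each cell's value is computed directly from its ring index min(i,j,size-1-i,size-1-j) and its offset along that ring, built with a nested comprehension and no mutation.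
import Mathlib
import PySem

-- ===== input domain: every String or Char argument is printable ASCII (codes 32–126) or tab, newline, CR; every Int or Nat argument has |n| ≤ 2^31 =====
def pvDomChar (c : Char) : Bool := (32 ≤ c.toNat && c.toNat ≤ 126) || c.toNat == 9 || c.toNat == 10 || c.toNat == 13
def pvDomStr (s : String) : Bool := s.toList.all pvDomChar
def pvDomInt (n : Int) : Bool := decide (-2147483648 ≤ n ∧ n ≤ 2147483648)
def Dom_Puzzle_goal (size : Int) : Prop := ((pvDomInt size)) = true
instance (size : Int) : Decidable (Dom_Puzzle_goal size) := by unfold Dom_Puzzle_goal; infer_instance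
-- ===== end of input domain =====

-- B replaces A's imperative spiral fill (four while-loops per ring, then a rescan for
-- size*size) by a closed-form per-cell formula from the cell's ring index and offset
-- (alternative decomposition, same asymptotic cost; no mutation).

-- ===== PORT A =====

-- Python `P[i][j] = v`; in A the indices are always nonnegative and in range
-- (proved where used), so the identity fallback branch never fires on reachable states.
def pvSet (P : List (List Int)) (i j v : Int) : List (List Int) :=
  if 0 ≤ i ∧ 0 ≤ j then P.modify i.toNat (fun row => row.set j.toNat v) else P

-- Python `P[i][j]` read; in A's final scan 0 ≤ i,j < size, always in range, so the defaults never fire.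
def pvGet (P : List (List Int)) (i j : Int) : Int :=
  (PySem.List.pyGet? ((PySem.List.pyGet? P i).getD []) j).getD 0

-- while j <= ysize - magic: puzzle[i][j] = number + 1; number += 1; j += 1   (returns puzzle, j, number)
def aLoop1 (b i j : Int) (P : List (List Int)) (n : Int) : List (List Int) × Int × Int :=
  if h : j ≤ b then aLoop1 b i (j + 1) (pvSet P i j (n + 1)) (n + 1) else (P, j, n)
termination_by (b + 1 - j).toNat
decreasing_by omega

-- while i <= xsize - magic: puzzle[i][j] = number + 1; number += 1; i += 1   (returns puzzle, i, number)
def aLoop2 (b j i : Int) (P : List (List Int)) (n : Int) : List (List Int) × Int × Int :=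
  if h : i ≤ b then aLoop2 b j (i + 1) (pvSet P i j (n + 1)) (n + 1) else (P, i, n)
termination_by (b + 1 - i).toNat
decreasing_by omega

-- while j >= magic: puzzle[i][j] = number + 1; number += 1; j -= 1   (returns puzzle, j, number)
def aLoop3 (lo i j : Int) (P : List (List Int)) (n : Int) : List (List Int) × Int × Int :=
  if h : lo ≤ j then aLoop3 lo i (j - 1) (pvSet P i j (n + 1)) (n + 1) else (P, j, n)
termination_by (j - lo + 1).toNat
decreasing_by omega

-- while i > magic: puzzle[i][j] = number + 1; number += 1; i -= 1   (returns puzzle, i, number)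
def aLoop4 (lo j i : Int) (P : List (List Int)) (n : Int) : List (List Int) × Int × Int :=
  if h : lo < i then aLoop4 lo j (i - 1) (pvSet P i j (n + 1)) (n + 1) else (P, i, n)
termination_by (i - lo).toNat
decreasing_by omega

-- one iteration of A's `while magic < size` body (i = magic; j = magic; the four loops with
-- the in-between i/j adjustments); returns (puzzle, number)
def aRing (size magic : Int) (P : List (List Int)) (n : Int) : List (List Int) × Int :=
  let r1 := aLoop1 (size - 1 - magic) magic magic P n
  let r2 := aLoop2 (size - 1 - magic) (r1.2.1 - 1) (magic + 1) r1.1 r1.2.2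
  let r3 := aLoop3 magic (r2.2.1 - 1) (r1.2.1 - 1 - 1) r2.1 r2.2.2
  let r4 := aLoop4 magic (r3.2.1 + 1) (r2.2.1 - 1 - 1) r3.1 r3.2.2
  (r4.1, r4.2.2)

def aOuter (size magic : Int) (P : List (List Int)) (n : Int) : List (List Int) × Int :=
  if h : magic < size then
    aOuter size (magic + 1) (aRing size magic P n).1 (aRing size magic P n).2
  else (P, n)
termination_by (size - magic).toNat
decreasing_by omega

-- inner `while j < size` of the final zeroing scan
def aZeroJ (size i j : Int) (P : List (List Int)) : List (List Int) :=
  if h : j < size then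
    aZeroJ size i (j + 1) (if pvGet P i j = size * size then pvSet P i j 0 else P)
  else P
termination_by (size - j).toNat
decreasing_by omega

-- outer `while i < size` of the final zeroing scan
def aZeroI (size i : Int) (P : List (List Int)) : List (List Int) :=
  if h : i < size then aZeroI size (i + 1) (aZeroJ size i 0 P) else P
termination_by (size - i).toNat
decreasing_by omega

def Puzzle_goal (size : Int) : List (List Int) :=
  -- puzzle = []; for number in range(0, size): puzzle.append([0] * size)
  let puzzle := (PySem.List.pyRange 0 size 1).foldl
    (fun acc _ => acc ++ [List.replicate size.toNat 0]) []
  let r := aOuter size 0 puzzle 0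
  aZeroI size 0 r.1

-- ===== PORT B =====

-- m = min(i, j, size - 1 - i, size - 1 - j)  (Python's 4-ary min, left-associated)
def rIdx (s i j : Int) : Int := min (min (min i j) (s - 1 - i)) (s - 1 - j)

-- the local helper `val` of Source B up to (but not including) its final blank `if`
def preVal (s i j : Int) : Int :=
  let m := rIdx s i j
  let L := s - 1 - 2 * m
  let off :=
    if i = m then j - m
    else if j = s - 1 - m then L + (i - m)
    else if i = s - 1 - m then 2 * L + (s - 1 - m - j)
    else 3 * L + (s - 1 - m - i)
  4 * m * (s - m) + off + 1

def Puzzle_goal_alt (size : Int) : List (List Int) :=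
  (PySem.List.pyRange 0 size 1).map (fun i =>
    (PySem.List.pyRange 0 size 1).map (fun j =>
      if preVal size i j = size * size then 0 else preVal size i j))

-- ===== PRECONDITION & SPEC =====
def Spec_Puzzle_goal (size : Int) (out : List (List Int)) : Prop := out = Puzzle_goal_alt size
instance (size : Int) (out : List (List Int)) : Decidable (Spec_Puzzle_goal size out) := by
  unfold Spec_Puzzle_goal; infer_instance

-- ===== CLAIM =====
def Claim_equal_Puzzle_goal : Prop := ∀ (size : Int), Dom_Puzzle_goal size → Spec_Puzzle_goal size (Puzzle_goal size)

-- ===== LEMMAS AND PROOFS =====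

lemma trip {α β γ : Type} {a a' : α} {b b' : β} {c c' : γ}
    (h1 : a = a') (h2 : b = b') (h3 : c = c') : (a, b, c) = (a', b', c') := by
  subst h1; subst h2; subst h3; rfl

-- value at cell (a, b) (Nat indices)
def cellAt (P : List (List Int)) (a b : Nat) : Option Int := P[a]?.bind (fun r => r[b]?)

-- P is a size × size matrix
def shapeS (s : Int) (P : List (List Int)) : Prop :=
  P.length = s.toNat ∧ ∀ (a : Nat) (r : List Int), P[a]? = some r → r.length = s.toNat

-- p is an in-range position
def posIn (s : Int) (p : Int × Int) : Prop := 0 ≤ p.1 ∧ p.1 < s ∧ 0 ≤ p.2 ∧ p.2 < s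

-- write consecutive values n, n+1, … at a list of positions
def fillG : List (Int × Int) → List (List Int) → Int → List (List Int)
  | [], P, _ => P
  | p :: t, P, n => fillG t (pvSet P p.1 p.2 n) (n + 1)

-- the cells of ring m, in A's writing order
def ringCells (s m : Int) : List (Int × Int) :=
  (PySem.List.pyRange m (s - 1 - m + 1) 1).map (fun j => (m, j)) ++
  (PySem.List.pyRange (m + 1) (s - 1 - m + 1) 1).map (fun i => (i, s - 1 - m)) ++
  ((PySem.List.pyRange (s - 1 - m - 1) (m - 1) (-1)).map (fun j => (s - 1 - m, j)) ++
   (PySem.List.pyRange (s - 1 - m - 1) m (-1)).map (fun i => (i, m)))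

-- offset of cell (i, j) along ring m (mirrors preVal's inner if-chain)
def offF (s m i j : Int) : Int :=
  if i = m then j - m
  else if j = s - 1 - m then (s - 1 - 2 * m) + (i - m)
  else if i = s - 1 - m then 2 * (s - 1 - 2 * m) + (s - 1 - m - j)
  else 3 * (s - 1 - 2 * m) + (s - 1 - m - i)

-- the matrix A's ring body produces, and the number of cells a ring writes
def ringG (s m : Int) (P : List (List Int)) (n : Int) : List (List Int) :=
  fillG ((PySem.List.pyRange (s - 1 - m - 1) m (-1)).map (fun i => (i, m)))
    (fillG ((PySem.List.pyRange (s - 1 - m - 1) (m - 1) (-1)).map (fun j => (s - 1 - m, j)))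
      (fillG ((PySem.List.pyRange (m + 1) (s - 1 - m + 1) 1).map (fun i => (i, s - 1 - m)))
        (fillG ((PySem.List.pyRange m (s - 1 - m + 1) 1).map (fun j => (m, j))) P n)
        (n + (s - 1 - m + 1 - m)))
      (n + (s - 1 - m + 1 - m) + (s - 1 - m - m)))
    (n + (s - 1 - m + 1 - m) + (s - 1 - m - m) + (s - 1 - m - m))

def cntRing (s m : Int) : Int := if m < s - 1 - m then 4 * (s - 1 - m - m) else 1

-- rIdx facts ------------------------------------------------------------------

lemma rIdx_le (s i j : Int) :
    rIdx s i j ≤ i ∧ rIdx s i j ≤ j ∧ rIdx s i j ≤ s - 1 - i ∧ rIdx s i j ≤ s - 1 - j := by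
  unfold rIdx
  refine ⟨?_, ?_, ?_, ?_⟩
  · exact le_trans (min_le_left _ _) (le_trans (min_le_left _ _) (min_le_left _ _))
  · exact le_trans (min_le_left _ _) (le_trans (min_le_left _ _) (min_le_right _ _))
  · exact le_trans (min_le_left _ _) (min_le_right _ _)
  · exact min_le_right _ _

lemma rIdx_choice (s i j : Int) :
    rIdx s i j = i ∨ rIdx s i j = j ∨ rIdx s i j = s - 1 - i ∨ rIdx s i j = s - 1 - j := by
  unfold rIdx
  rcases min_choice (min (min i j) (s - 1 - i)) (s - 1 - j) with h | h <;> rw [h]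
  · rcases min_choice (min i j) (s - 1 - i) with h2 | h2 <;> rw [h2]
    · rcases min_choice i j with h3 | h3 <;> rw [h3]
      · exact Or.inl rfl
      · exact Or.inr (Or.inl rfl)
    · exact Or.inr (Or.inr (Or.inl rfl))
  · exact Or.inr (Or.inr (Or.inr rfl))

lemma le_rIdx {s i j m : Int} (h1 : m ≤ i) (h2 : m ≤ j) (h3 : m ≤ s - 1 - i) (h4 : m ≤ s - 1 - j) :
    m ≤ rIdx s i j := le_min (le_min (le_min h1 h2) h3) h4

lemma preVal_eq {s i j m : Int} (hr : rIdx s i j = m) :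
    preVal s i j = 4 * m * (s - m) + offF s m i j + 1 := by
  simp only [preVal, offF, hr]

-- cell / pvSet facts ---------------------------------------------------------

lemma shapeS_pvSet {s : Int} {P : List (List Int)} (hs : shapeS s P) (i j v : Int) :
    shapeS s (pvSet P i j v) := by
  obtain ⟨hl, hr⟩ := hs
  unfold pvSet
  split
  · refine ⟨by rw [List.length_modify]; exact hl, ?_⟩
    intro a r hraw
    rw [List.getElem?_modify] at hraw
    cases hPa : P[a]? with
    | none =>
      rw [hPa] at hraw
      rw [show ((fun r => if i.toNat = a then r.set j.toNat v else r) <$> (none : Option (List Int)))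
          = none from rfl] at hraw
      cases hraw
    | some row0 =>
      rw [hPa] at hraw
      rw [show ((fun r => if i.toNat = a then r.set j.toNat v else r) <$> some row0)
          = some (if i.toNat = a then row0.set j.toNat v else row0) from rfl] at hraw
      injection hraw with hraw2
      subst hraw2
      split
      · rw [List.length_set]; exact hr _ _ hPa
      · exact hr _ _ hPa
  · exact ⟨hl, hr⟩

lemma cellAt_pvSet {s : Int} {P : List (List Int)} (hs : shapeS s P) {i j : Int} (v : Int)
    (hi0 : 0 ≤ i) (hi : i < s) (hj0 : 0 ≤ j) (hj : j < s) (a b : Nat) :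
    cellAt (pvSet P i j v) a b =
      if a = i.toNat ∧ b = j.toNat then some v else cellAt P a b := by
  obtain ⟨hl, hr⟩ := hs
  unfold pvSet cellAt
  rw [if_pos ⟨hi0, hj0⟩, List.getElem?_modify]
  have hbind : ∀ (x : List Int), (Option.some x).bind (fun r => r[b]?) = x[b]? := fun _ => rfl
  cases hPa : P[a]? with
  | none =>
    rw [if_neg (fun hh : a = i.toNat ∧ b = j.toNat => by
      have hge : P.length ≤ a := by
        by_contra hc
        rw [List.getElem?_eq_getElem (by omega)] at hPa
        cases hPa
      omega)]
    rfl
  | some row =>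
    have hrl : row.length = s.toNat := hr _ _ hPa
    rw [show ((fun r => if i.toNat = a then r.set j.toNat v else r) <$> some row)
        = some (if i.toNat = a then row.set j.toNat v else row) from rfl, hbind, hbind]
    by_cases hia : i.toNat = a
    · rw [if_pos hia, List.getElem?_set]
      by_cases hjb : j.toNat = b
      · rw [if_pos hjb, if_pos (by omega), if_pos ⟨hia.symm, hjb.symm⟩]
      · rw [if_neg hjb, if_neg (fun hh => hjb hh.2.symm)]
    · rw [if_neg hia, if_neg (fun hh => hia hh.1.symm)]

lemma cellAt_exists {s : Int} {P : List (List Int)} (hs : shapeS s P) {a b : Nat}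
    (ha : a < s.toNat) (hb : b < s.toNat) : ∃ v, cellAt P a b = some v := by
  obtain ⟨hl, hr⟩ := hs
  have hlt : a < P.length := by omega
  obtain ⟨row, hrow⟩ : ∃ r, P[a]? = some r := ⟨P[a], List.getElem?_eq_getElem hlt⟩
  have hrl : row.length = s.toNat := hr _ _ hrow
  refine ⟨row[b], ?_⟩
  unfold cellAt
  rw [hrow]
  simp only [Option.bind_some]
  exact List.getElem?_eq_getElem (by omega)

lemma pvGet_eq_cellAt (P : List (List Int)) {i j : Int} (hi : 0 ≤ i) (hj : 0 ≤ j) :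
    pvGet P i j = (cellAt P i.toNat j.toNat).getD 0 := by
  obtain ⟨a, rfl⟩ : ∃ a : Nat, i = (a : Int) := ⟨i.toNat, by omega⟩
  obtain ⟨b, rfl⟩ : ∃ b : Nat, j = (b : Int) := ⟨j.toNat, by omega⟩
  unfold pvGet cellAt
  rw [PySem.List.pyGet?_natCast, PySem.List.pyGet?_natCast]
  simp only [Int.toNat_natCast]
  cases hrow : P[a]? <;> simp_all

-- fillG facts ----------------------------------------------------------------

lemma shapeS_fillG {s : Int} : ∀ (ps : List (Int × Int)) (P : List (List Int)) (n : Int),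
    shapeS s P → shapeS s (fillG ps P n) := by
  intro ps
  induction ps with
  | nil => intro P n h; exact h
  | cons p t ih => intro P n h; exact ih _ _ (shapeS_pvSet h _ _ _)

lemma cellAt_fillG_skip {s : Int} {a b : Nat} :
    ∀ (ps : List (Int × Int)) (P : List (List Int)) (n : Int), shapeS s P →
    (∀ p ∈ ps, posIn s p) → (∀ p ∈ ps, p ≠ ((a : Int), (b : Int))) →
    cellAt (fillG ps P n) a b = cellAt P a b := by
  intro ps
  induction ps with
  | nil => intro P n _ _ _; rfl
  | cons p t ih =>
    intro P n hs hpos hnm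
    have hp := hpos p List.mem_cons_self
    obtain ⟨h1, h2, h3, h4⟩ := hp
    rw [show fillG (p :: t) P n = fillG t (pvSet P p.1 p.2 n) (n + 1) from rfl]
    rw [ih _ _ (shapeS_pvSet hs _ _ _) (fun q hq => hpos q (List.mem_cons_of_mem _ hq))
      (fun q hq => hnm q (List.mem_cons_of_mem _ hq))]
    rw [cellAt_pvSet hs _ h1 h2 h3 h4]
    rw [if_neg]
    intro hh
    exact hnm p List.mem_cons_self (by
      have : p.1 = (a : Int) := by omega
      have : p.2 = (b : Int) := by omega
      exact Prod.ext (by omega) (by omega))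

lemma fillG_append : ∀ (xs ys : List (Int × Int)) (P : List (List Int)) (n : Int),
    fillG (xs ++ ys) P n = fillG ys (fillG xs P n) (n + xs.length) := by
  intro xs
  induction xs with
  | nil => intro ys P n; simp [fillG]
  | cons x t ih =>
    intro ys P n
    rw [List.cons_append, show fillG ((x :: (t ++ ys))) P n = fillG (t ++ ys) (pvSet P x.1 x.2 n) (n + 1) from rfl,
      ih, show fillG (x :: t) P n = fillG t (pvSet P x.1 x.2 n) (n + 1) from rfl]
    congr 1
    rw [List.length_cons]
    push_cast
    ring

lemma cellAt_fillG_hit {s : Int} {a b : Nat} (l1 l2 : List (Int × Int)) (P : List (List Int)) (n : Int)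
    (hs : shapeS s P) (hposp : posIn s ((a : Int), (b : Int)))
    (hpos2 : ∀ p ∈ l2, posIn s p) (hnm : ∀ p ∈ l2, p ≠ ((a : Int), (b : Int))) :
    cellAt (fillG (l1 ++ ((a : Int), (b : Int)) :: l2) P n) a b = some (n + l1.length) := by
  rw [fillG_append]
  rw [show fillG ((((a : Int), (b : Int))) :: l2) (fillG l1 P n) (n + l1.length)
      = fillG l2 (pvSet (fillG l1 P n) (a : Int) (b : Int) (n + l1.length)) (n + l1.length + 1) from rfl]
  have hsf : shapeS s (fillG l1 P n) := shapeS_fillG l1 P n hs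
  obtain ⟨h1, h2, h3, h4⟩ := hposp
  rw [cellAt_fillG_skip l2 _ _ (shapeS_pvSet hsf _ _ _) hpos2 hnm]
  rw [cellAt_pvSet hsf _ h1 h2 h3 h4, if_pos (by constructor <;> omega)]

-- descending range split
lemma pyRange_neg_split (a x b : Int) (h1 : b ≤ x) (h2 : x ≤ a) :
    PySem.List.pyRange a b (-1) = PySem.List.pyRange a x (-1) ++ PySem.List.pyRange x b (-1) := by
  rw [PySem.List.pyRange_neg_one_eq_reverse, PySem.List.pyRange_neg_one_eq_reverse (a := a) (b := x),
    PySem.List.pyRange_neg_one_eq_reverse (a := x) (b := b),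
    PySem.List.pyRange_one_append (b + 1) (x + 1) (a + 1) (by omega) (by omega), List.reverse_append]

-- ringG is fillG over ringCells ----------------------------------------------

lemma ringG_eq_fillG {s m : Int} (hm : m ≤ s - 1 - m)
    (P : List (List Int)) (n : Int) :
    ringG s m P n = fillG (ringCells s m) P n := by
  unfold ringG ringCells
  rw [fillG_append, fillG_append, fillG_append]
  simp only [List.length_append, List.length_map, PySem.List.length_pyRange_one,
    PySem.List.length_pyRange_neg_one]
  congr 1 <;> (try omega) <;> congr 1 <;> (try omega) <;> congr 1 <;> omega

-- membership in ringCells ----------------------------------------------------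

lemma mem_ringCells {s m : Int} {p : Int × Int} (h : p ∈ ringCells s m) :
    m ≤ p.1 ∧ p.1 ≤ s - 1 - m ∧ m ≤ p.2 ∧ p.2 ≤ s - 1 - m ∧
      (p.1 = m ∨ p.2 = s - 1 - m ∨ p.1 = s - 1 - m ∨ p.2 = m) := by
  unfold ringCells at h
  simp only [List.mem_append, List.mem_map] at h
  rcases h with ((⟨x, hx, rfl⟩ | ⟨x, hx, rfl⟩) | (⟨x, hx, rfl⟩ | ⟨x, hx, rfl⟩))
  · have := PySem.List.mem_pyRange_one.1 hx
    exact ⟨by omega, by omega, by omega, by omega, Or.inl rfl⟩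
  · have := PySem.List.mem_pyRange_one.1 hx
    exact ⟨by omega, by omega, by omega, by omega, Or.inr (Or.inl rfl)⟩
  · have := PySem.List.mem_pyRange_neg_one.1 hx
    exact ⟨by omega, by omega, by omega, by omega, Or.inr (Or.inr (Or.inl rfl))⟩
  · have := PySem.List.mem_pyRange_neg_one.1 hx
    exact ⟨by omega, by omega, by omega, by omega, Or.inr (Or.inr (Or.inr rfl))⟩

lemma posIn_ringCells {s m : Int} (h0 : 0 ≤ m) {p : Int × Int} (h : p ∈ ringCells s m) :
    posIn s p := by
  have := mem_ringCells h
  exact ⟨by omega, by omega, by omega, by omega⟩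

lemma not_mem_ringCells {s m : Int} {a b : Nat} (h : rIdx s (a : Int) (b : Int) ≠ m) :
    ∀ p ∈ ringCells s m, p ≠ ((a : Int), (b : Int)) := by
  intro p hp hpe
  subst hpe
  obtain ⟨c1, c2, c3, c4, c5⟩ := mem_ringCells hp
  simp only at c1 c2 c3 c4 c5
  have hlo : m ≤ rIdx s (a : Int) (b : Int) := le_rIdx c1 c3 (by omega) (by omega)
  obtain ⟨d1, d2, d3, d4⟩ := rIdx_le s (a : Int) (b : Int)
  omega

-- the value a ring writes at its own cells -----------------------------------

lemma cellAt_ring_hit {s m : Int} {a b : Nat} (h0 : 0 ≤ m)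
    (hr : rIdx s (a : Int) (b : Int) = m) (P : List (List Int)) (n : Int) (hs : shapeS s P) :
    cellAt (fillG (ringCells s m) P n) a b = some (n + offF s m (a : Int) (b : Int)) := by
  obtain ⟨d1, d2, d3, d4⟩ := rIdx_le s (a : Int) (b : Int)
  rw [hr] at d1 d2 d3 d4
  have hch := rIdx_choice s (a : Int) (b : Int)
  rw [hr] at hch
  have hposp : posIn s ((a : Int), (b : Int)) := ⟨by omega, by omega, by omega, by omega⟩
  by_cases hA : (a : Int) = m
  · -- top row
    have hsplit : ringCells s m =
        ((PySem.List.pyRange m (b : Int) 1).map (fun j => ((m : Int), j))) ++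
        (((a : Int), (b : Int)) ::
          (((PySem.List.pyRange ((b : Int) + 1) (s - 1 - m + 1) 1).map (fun j => ((m : Int), j))) ++
           ((PySem.List.pyRange (m + 1) (s - 1 - m + 1) 1).map (fun i => (i, s - 1 - m)) ++
            ((PySem.List.pyRange (s - 1 - m - 1) (m - 1) (-1)).map (fun j => (s - 1 - m, j)) ++
             (PySem.List.pyRange (s - 1 - m - 1) m (-1)).map (fun i => (i, m)))))) := by
      rw [hA]
      unfold ringCells
      rw [PySem.List.pyRange_one_append m (b : Int) (s - 1 - m + 1) (by omega) (by omega),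
        PySem.List.pyRange_one_cons (show (b : Int) < s - 1 - m + 1 from by omega)]
      simp [List.map_append, List.append_assoc]
    rw [hsplit, cellAt_fillG_hit _ _ P n hs hposp ?pos ?nm]
    case pos =>
      intro p hp
      simp only [List.mem_append, List.mem_map] at hp
      rcases hp with ⟨x, hx, rfl⟩ | (⟨x, hx, rfl⟩ | (⟨x, hx, rfl⟩ | ⟨x, hx, rfl⟩))
      · have := PySem.List.mem_pyRange_one.1 hx
        exact ⟨by omega, by omega, by omega, by omega⟩
      · have := PySem.List.mem_pyRange_one.1 hx
        exact ⟨by omega, by omega, by omega, by omega⟩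
      · have := PySem.List.mem_pyRange_neg_one.1 hx
        exact ⟨by omega, by omega, by omega, by omega⟩
      · have := PySem.List.mem_pyRange_neg_one.1 hx
        exact ⟨by omega, by omega, by omega, by omega⟩
    case nm =>
      intro p hp
      simp only [List.mem_append, List.mem_map] at hp
      rcases hp with ⟨x, hx, rfl⟩ | (⟨x, hx, rfl⟩ | (⟨x, hx, rfl⟩ | ⟨x, hx, rfl⟩)) <;>
        · intro he
          rw [Prod.mk.injEq] at he
          first
          | (have := PySem.List.mem_pyRange_one.1 hx; omega)
          | (have := PySem.List.mem_pyRange_neg_one.1 hx; omega)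
    rw [List.length_map, PySem.List.length_pyRange_one]
    unfold offF
    rw [if_pos hA]
    congr 1
    omega
  · by_cases hB : (b : Int) = s - 1 - m
    · -- right column
      have hsplit : ringCells s m =
          ((PySem.List.pyRange m (s - 1 - m + 1) 1).map (fun j => ((m : Int), j)) ++
           (PySem.List.pyRange (m + 1) (a : Int) 1).map (fun i => (i, s - 1 - m))) ++
          (((a : Int), (b : Int)) ::
            ((PySem.List.pyRange ((a : Int) + 1) (s - 1 - m + 1) 1).map (fun i => (i, s - 1 - m)) ++
             ((PySem.List.pyRange (s - 1 - m - 1) (m - 1) (-1)).map (fun j => (s - 1 - m, j)) ++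
              (PySem.List.pyRange (s - 1 - m - 1) m (-1)).map (fun i => (i, m))))) := by
        rw [hB]
        unfold ringCells
        rw [PySem.List.pyRange_one_append (m + 1) (a : Int) (s - 1 - m + 1) (by omega) (by omega),
          PySem.List.pyRange_one_cons (show (a : Int) < s - 1 - m + 1 from by omega)]
        simp [List.map_append, List.append_assoc]
      rw [hsplit, cellAt_fillG_hit _ _ P n hs hposp ?pos ?nm]
      case pos =>
        intro p hp
        simp only [List.mem_append, List.mem_map] at hp
        rcases hp with ⟨x, hx, rfl⟩ | (⟨x, hx, rfl⟩ | ⟨x, hx, rfl⟩)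
        · have := PySem.List.mem_pyRange_one.1 hx
          exact ⟨by omega, by omega, by omega, by omega⟩
        · have := PySem.List.mem_pyRange_neg_one.1 hx
          exact ⟨by omega, by omega, by omega, by omega⟩
        · have := PySem.List.mem_pyRange_neg_one.1 hx
          exact ⟨by omega, by omega, by omega, by omega⟩
      case nm =>
        intro p hp
        simp only [List.mem_append, List.mem_map] at hp
        rcases hp with ⟨x, hx, rfl⟩ | (⟨x, hx, rfl⟩ | ⟨x, hx, rfl⟩) <;>
          · intro he
            rw [Prod.mk.injEq] at he
            first
            | (have := PySem.List.mem_pyRange_one.1 hx; omega)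
            | (have := PySem.List.mem_pyRange_neg_one.1 hx; omega)
      rw [List.length_append, List.length_map, List.length_map,
        PySem.List.length_pyRange_one, PySem.List.length_pyRange_one]
      unfold offF
      rw [if_neg hA, if_pos hB]
      congr 1
      omega
    · by_cases hC : (a : Int) = s - 1 - m
      · -- bottom row
        have hsplit : ringCells s m =
            ((PySem.List.pyRange m (s - 1 - m + 1) 1).map (fun j => ((m : Int), j)) ++
             ((PySem.List.pyRange (m + 1) (s - 1 - m + 1) 1).map (fun i => (i, s - 1 - m)) ++
              (PySem.List.pyRange (s - 1 - m - 1) (b : Int) (-1)).map (fun j => (s - 1 - m, j)))) ++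
            (((a : Int), (b : Int)) ::
              ((PySem.List.pyRange ((b : Int) - 1) (m - 1) (-1)).map (fun j => (s - 1 - m, j)) ++
               (PySem.List.pyRange (s - 1 - m - 1) m (-1)).map (fun i => (i, m)))) := by
          rw [hC]
          unfold ringCells
          rw [pyRange_neg_split (s - 1 - m - 1) (b : Int) (m - 1) (by omega) (by omega),
            PySem.List.pyRange_neg_one_cons (show (m - 1 : Int) < (b : Int) from by omega)]
          simp [List.map_append, List.append_assoc]
        rw [hsplit, cellAt_fillG_hit _ _ P n hs hposp ?pos ?nm]
        case pos =>
          intro p hp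
          simp only [List.mem_append, List.mem_map] at hp
          rcases hp with ⟨x, hx, rfl⟩ | ⟨x, hx, rfl⟩
          · have := PySem.List.mem_pyRange_neg_one.1 hx
            exact ⟨by omega, by omega, by omega, by omega⟩
          · have := PySem.List.mem_pyRange_neg_one.1 hx
            exact ⟨by omega, by omega, by omega, by omega⟩
        case nm =>
          intro p hp
          simp only [List.mem_append, List.mem_map] at hp
          rcases hp with ⟨x, hx, rfl⟩ | ⟨x, hx, rfl⟩ <;>
            · intro he
              rw [Prod.mk.injEq] at he
              have := PySem.List.mem_pyRange_neg_one.1 hx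
              omega
        rw [List.length_append, List.length_append, List.length_map, List.length_map,
          List.length_map, PySem.List.length_pyRange_one, PySem.List.length_pyRange_one,
          PySem.List.length_pyRange_neg_one]
        unfold offF
        rw [if_neg hA, if_neg hB, if_pos hC]
        congr 1
        omega
      · -- left column
        have hD : (b : Int) = m := by
          rcases hch with h | h | h | h <;> omega
        have hsplit : ringCells s m =
            ((PySem.List.pyRange m (s - 1 - m + 1) 1).map (fun j => ((m : Int), j)) ++
             ((PySem.List.pyRange (m + 1) (s - 1 - m + 1) 1).map (fun i => (i, s - 1 - m)) ++
              ((PySem.List.pyRange (s - 1 - m - 1) (m - 1) (-1)).map (fun j => (s - 1 - m, j)) ++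
               (PySem.List.pyRange (s - 1 - m - 1) (a : Int) (-1)).map (fun i => (i, m))))) ++
            (((a : Int), (b : Int)) ::
              (PySem.List.pyRange ((a : Int) - 1) m (-1)).map (fun i => (i, m))) := by
          rw [hD]
          unfold ringCells
          rw [pyRange_neg_split (s - 1 - m - 1) (a : Int) m (by omega) (by omega),
            PySem.List.pyRange_neg_one_cons (show (m : Int) < (a : Int) from by omega)]
          simp [List.map_append, List.append_assoc]
        rw [hsplit, cellAt_fillG_hit _ _ P n hs hposp ?pos ?nm]
        case pos =>
          intro p hp
          simp only [List.mem_map] at hp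
          obtain ⟨x, hx, rfl⟩ := hp
          have := PySem.List.mem_pyRange_neg_one.1 hx
          exact ⟨by omega, by omega, by omega, by omega⟩
        case nm =>
          intro p hp
          simp only [List.mem_map] at hp
          obtain ⟨x, hx, rfl⟩ := hp
          intro he
          rw [Prod.mk.injEq] at he
          have := PySem.List.mem_pyRange_neg_one.1 hx
          omega
        rw [List.length_append, List.length_append, List.length_append, List.length_map,
          List.length_map, List.length_map, List.length_map,
          PySem.List.length_pyRange_one, PySem.List.length_pyRange_one,
          PySem.List.length_pyRange_neg_one, PySem.List.length_pyRange_neg_one]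
        unfold offF
        rw [if_neg hA, if_neg hB, if_neg hC]
        congr 1
        omega

-- the outer loop pointwise ---------------------------------------------------

lemma aLoop1_eq (b i : Int) : ∀ (k : Nat) (j : Int) (P : List (List Int)) (n : Int),
    (b + 1 - j).toNat ≤ k → j ≤ b + 1 →
    aLoop1 b i j P n =
      (fillG ((PySem.List.pyRange j (b + 1) 1).map (fun c => (i, c))) P (n + 1),
        b + 1, n + (b + 1 - j)) := by
  intro k
  induction k with
  | zero =>
    intro j P n hk hj
    have hje : j = b + 1 := by omega
    subst hje
    rw [aLoop1, dif_neg (by omega), PySem.List.pyRange_one_eq_nil (by omega)]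
    exact trip rfl rfl (by omega)
  | succ k ih =>
    intro j P n hk hj
    by_cases h : j ≤ b
    · rw [aLoop1, dif_pos h, PySem.List.pyRange_one_cons (by omega), List.map_cons,
        ih (j + 1) (pvSet P i j (n + 1)) (n + 1) (by omega) (by omega)]
      exact trip rfl rfl (by omega)
    · have hje : j = b + 1 := by omega
      subst hje
      rw [aLoop1, dif_neg (by omega), PySem.List.pyRange_one_eq_nil (by omega)]
      exact trip rfl rfl (by omega)

lemma aLoop2_eq (b j : Int) : ∀ (k : Nat) (i : Int) (P : List (List Int)) (n : Int),
    (b + 1 - i).toNat ≤ k → i ≤ b + 1 →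
    aLoop2 b j i P n =
      (fillG ((PySem.List.pyRange i (b + 1) 1).map (fun r => (r, j))) P (n + 1),
        b + 1, n + (b + 1 - i)) := by
  intro k
  induction k with
  | zero =>
    intro i P n hk hi
    have hie : i = b + 1 := by omega
    subst hie
    rw [aLoop2, dif_neg (by omega), PySem.List.pyRange_one_eq_nil (by omega)]
    exact trip rfl rfl (by omega)
  | succ k ih =>
    intro i P n hk hi
    by_cases h : i ≤ b
    · rw [aLoop2, dif_pos h, PySem.List.pyRange_one_cons (by omega), List.map_cons,
        ih (i + 1) (pvSet P i j (n + 1)) (n + 1) (by omega) (by omega)]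
      exact trip rfl rfl (by omega)
    · have hie : i = b + 1 := by omega
      subst hie
      rw [aLoop2, dif_neg (by omega), PySem.List.pyRange_one_eq_nil (by omega)]
      exact trip rfl rfl (by omega)

lemma aLoop3_eq (lo i : Int) : ∀ (k : Nat) (j : Int) (P : List (List Int)) (n : Int),
    (j - lo + 1).toNat ≤ k → lo - 1 ≤ j →
    aLoop3 lo i j P n =
      (fillG ((PySem.List.pyRange j (lo - 1) (-1)).map (fun c => (i, c))) P (n + 1),
        lo - 1, n + (j - lo + 1)) := by
  intro k
  induction k with
  | zero =>
    intro j P n hk hj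
    have hje : j = lo - 1 := by omega
    subst hje
    rw [aLoop3, dif_neg (by omega), PySem.List.pyRange_neg_one_eq_nil (by omega)]
    exact trip rfl rfl (by omega)
  | succ k ih =>
    intro j P n hk hj
    by_cases h : lo ≤ j
    · rw [aLoop3, dif_pos h, PySem.List.pyRange_neg_one_cons (by omega), List.map_cons,
        ih (j - 1) (pvSet P i j (n + 1)) (n + 1) (by omega) (by omega)]
      exact trip rfl rfl (by omega)
    · have hje : j = lo - 1 := by omega
      subst hje
      rw [aLoop3, dif_neg (by omega), PySem.List.pyRange_neg_one_eq_nil (by omega)]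
      exact trip rfl rfl (by omega)

lemma aLoop4_eq (lo j : Int) : ∀ (k : Nat) (i : Int) (P : List (List Int)) (n : Int),
    (i - lo).toNat ≤ k → lo - 1 ≤ i →
    aLoop4 lo j i P n =
      (fillG ((PySem.List.pyRange i lo (-1)).map (fun r => (r, j))) P (n + 1),
        if lo ≤ i then lo else i, n + ((i - lo).toNat : Int)) := by
  intro k
  induction k with
  | zero =>
    intro i P n hk hi
    rw [aLoop4, dif_neg (by omega), PySem.List.pyRange_neg_one_eq_nil (by omega)]
    exact trip rfl (by split_ifs <;> omega) (by omega)
  | succ k ih =>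
    intro i P n hk hi
    by_cases h : lo < i
    · rw [aLoop4, dif_pos h, PySem.List.pyRange_neg_one_cons (by omega), List.map_cons,
        ih (i - 1) (pvSet P i j (n + 1)) (n + 1) (by omega) (by omega)]
      exact trip rfl (by split_ifs <;> omega) (by omega)
    · rw [aLoop4, dif_neg h, PySem.List.pyRange_neg_one_eq_nil (by omega)]
      exact trip rfl (by split_ifs <;> omega) (by omega)

lemma aRing_eq (s m : Int) (P : List (List Int)) (n : Int) (h0 : 0 ≤ m) (h : m ≤ s - 1 - m) :
    aRing s m P n = (ringG s m P (n + 1), n + cntRing s m) := by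
  simp only [aRing]
  rw [aLoop1_eq (s - 1 - m) m ((s - 1 - m + 1 - m).toNat) m P n le_rfl (by omega)]
  dsimp only
  rw [show (s - 1 - m + 1 - 1 : Int) = s - 1 - m from by ring]
  rw [aLoop2_eq (s - 1 - m) (s - 1 - m) ((s - 1 - m + 1 - (m + 1)).toNat) (m + 1) _ _ le_rfl (by omega)]
  dsimp only
  rw [show (s - 1 - m + 1 - 1 : Int) = s - 1 - m from by ring]
  rw [aLoop3_eq m (s - 1 - m) ((s - 1 - m - 1 - m + 1).toNat) (s - 1 - m - 1) _ _ le_rfl (by omega)]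
  dsimp only
  rw [show (m - 1 + 1 : Int) = m from by ring]
  rw [aLoop4_eq m m ((s - 1 - m - 1 - m).toNat) (s - 1 - m - 1) _ _ le_rfl (by omega)]
  dsimp only
  unfold ringG
  refine Prod.ext ?_ ?_
  · dsimp only
    rw [show (n + (s - 1 - m + 1 - m) + 1 : Int) = n + 1 + (s - 1 - m + 1 - m) from by ring]
    rw [show (n + (s - 1 - m + 1 - m) + (s - 1 - m + 1 - (m + 1)) + 1 : Int)
        = n + 1 + (s - 1 - m + 1 - m) + (s - 1 - m - m) from by ring]
    rw [show (n + (s - 1 - m + 1 - m) + (s - 1 - m + 1 - (m + 1)) + (s - 1 - m - 1 - m + 1) + 1 : Int)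
        = n + 1 + (s - 1 - m + 1 - m) + (s - 1 - m - m) + (s - 1 - m - m) from by ring]
  · dsimp only
    unfold cntRing
    split_ifs <;> omega

lemma aRing_noop (s m : Int) (P : List (List Int)) (n : Int) (h : s - 1 - m < m) :
    aRing s m P n = (P, n) := by
  simp only [aRing]
  rw [aLoop1, dif_neg (by omega)]
  dsimp only
  rw [aLoop2, dif_neg (by omega)]
  dsimp only
  rw [aLoop3, dif_neg (by omega)]
  dsimp only
  rw [aLoop4, dif_neg (by omega)]

lemma aOuter_noop : ∀ (k : Nat) (s m : Int) (P : List (List Int)) (n : Int),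
    (s - m).toNat ≤ k → s - 1 - m < m → 0 ≤ m → aOuter s m P n = (P, n) := by
  intro k
  induction k with
  | zero =>
    intro s m P n hk h h0
    rw [aOuter, dif_neg (by omega)]
  | succ k ih =>
    intro s m P n hk h h0
    by_cases hm : m < s
    · rw [aOuter, dif_pos hm, aRing_noop s m P n h]
      dsimp only
      exact ih s (m + 1) P n (by omega) (by omega) (by omega)
    · rw [aOuter, dif_neg hm]

lemma outer_cells : ∀ (k : Nat) (s m : Int) (P : List (List Int)),
    (s - m).toNat ≤ k → 0 ≤ m → shapeS s P →
    shapeS s (aOuter s m P (4 * m * (s - m))).1 ∧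
    ∀ a b : Nat, a < s.toNat → b < s.toNat →
      cellAt (aOuter s m P (4 * m * (s - m))).1 a b =
        if m ≤ rIdx s (a : Int) (b : Int) then some (preVal s (a : Int) (b : Int))
        else cellAt P a b := by
  intro k
  induction k with
  | zero =>
    intro s m P hk h0 hs
    rw [aOuter, dif_neg (by omega)]
    refine ⟨hs, ?_⟩
    intro a b ha hb
    obtain ⟨d1, d2, d3, d4⟩ := rIdx_le s (a : Int) (b : Int)
    rw [if_neg (by omega)]
  | succ k ih =>
    intro s m P hk h0 hs
    by_cases hm : m < s
    · by_cases hg : m ≤ s - 1 - m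
      · rw [aOuter, dif_pos hm, aRing_eq s m P _ h0 hg]
        dsimp only
        rw [ringG_eq_fillG hg]
        by_cases hlt : m < s - 1 - m
        · have hn : 4 * m * (s - m) + cntRing s m = 4 * (m + 1) * (s - (m + 1)) := by
            unfold cntRing
            rw [if_pos hlt]
            ring
          rw [hn]
          obtain ⟨ihs, ihc⟩ := ih s (m + 1) (fillG (ringCells s m) P (4 * m * (s - m) + 1))
            (by omega) (by omega) (shapeS_fillG _ _ _ hs)
          refine ⟨ihs, ?_⟩
          intro a b ha hb
          rw [ihc a b ha hb]
          obtain ⟨d1, d2, d3, d4⟩ := rIdx_le s (a : Int) (b : Int)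
          by_cases h1 : m + 1 ≤ rIdx s (a : Int) (b : Int)
          · rw [if_pos h1, if_pos (by omega)]
          · by_cases h2 : rIdx s (a : Int) (b : Int) = m
            · rw [if_neg h1, cellAt_ring_hit h0 h2 P _ hs, if_pos (by omega), preVal_eq h2]
              congr 1
              ring
            · rw [if_neg h1,
                cellAt_fillG_skip _ _ _ hs (fun p hp => posIn_ringCells h0 hp)
                  (not_mem_ringCells h2),
                if_neg (by omega)]
        · have heq : m = s - 1 - m := by omega
          rw [aOuter_noop k s (m + 1) _ _ (by omega) (by omega) (by omega)]
          dsimp only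
          refine ⟨shapeS_fillG _ _ _ hs, ?_⟩
          intro a b ha hb
          obtain ⟨d1, d2, d3, d4⟩ := rIdx_le s (a : Int) (b : Int)
          by_cases h2 : rIdx s (a : Int) (b : Int) = m
          · rw [cellAt_ring_hit h0 h2 P _ hs, if_pos (by omega), preVal_eq h2]
            congr 1
            ring
          · rw [cellAt_fillG_skip _ _ _ hs (fun p hp => posIn_ringCells h0 hp)
                (not_mem_ringCells h2),
              if_neg (by omega)]
      · rw [aOuter_noop (k + 1) s m P _ hk (by omega) h0]
        dsimp only
        refine ⟨hs, ?_⟩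
        intro a b ha hb
        obtain ⟨d1, d2, d3, d4⟩ := rIdx_le s (a : Int) (b : Int)
        rw [if_neg (by omega)]
    · rw [aOuter, dif_neg hm]
      refine ⟨hs, ?_⟩
      intro a b ha hb
      obtain ⟨d1, d2, d3, d4⟩ := rIdx_le s (a : Int) (b : Int)
      rw [if_neg (by omega)]

-- the zeroing scan pointwise -------------------------------------------------

lemma zeroJ_cells : ∀ (k : Nat) (s i j : Int) (P : List (List Int)),
    (s - j).toNat ≤ k → 0 ≤ i → i < s → 0 ≤ j → shapeS s P →
    shapeS s (aZeroJ s i j P) ∧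
    ∀ a b : Nat, a < s.toNat → b < s.toNat →
      cellAt (aZeroJ s i j P) a b =
        if (a : Int) = i ∧ j ≤ (b : Int) ∧ cellAt P a b = some (s * s) then some 0
        else cellAt P a b := by
  intro k
  induction k with
  | zero =>
    intro s i j P hk hi0 his hj0 hs
    rw [aZeroJ, dif_neg (by omega)]
    refine ⟨hs, ?_⟩
    intro a b ha hb
    rw [if_neg]
    rintro ⟨-, h2, -⟩
    omega
  | succ k ih =>
    intro s i j P hk hi0 his hj0 hs
    by_cases hj : j < s
    · rw [aZeroJ, dif_pos hj]
      have hsP' : shapeS s (if pvGet P i j = s * s then pvSet P i j 0 else P) := by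
        split
        · exact shapeS_pvSet hs _ _ _
        · exact hs
      have hcell : ∀ a b : Nat, a < s.toNat → b < s.toNat →
          cellAt (if pvGet P i j = s * s then pvSet P i j 0 else P) a b =
            if (a : Int) = i ∧ (b : Int) = j ∧ cellAt P a b = some (s * s)
            then some 0 else cellAt P a b := by
        intro a b ha hb
        obtain ⟨v, hv⟩ := cellAt_exists hs ha hb
        by_cases hget : pvGet P i j = s * s
        · rw [if_pos hget, cellAt_pvSet hs _ hi0 his hj0 hj a b]
          by_cases hab : a = i.toNat ∧ b = j.toNat
          · rw [if_pos hab]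
            rw [pvGet_eq_cellAt P hi0 hj0,
              show i.toNat = a from by omega, show j.toNat = b from by omega, hv] at hget
            simp only [Option.getD_some] at hget
            rw [if_pos ⟨by omega, by omega, by rw [hv, hget]⟩]
          · rw [if_neg hab, if_neg (by rintro ⟨e1, e2, -⟩; exact hab ⟨by omega, by omega⟩)]
        · rw [if_neg hget, if_neg]
          rintro ⟨e1, e2, e3⟩
          apply hget
          rw [pvGet_eq_cellAt P hi0 hj0, show i.toNat = a from by omega,
            show j.toNat = b from by omega, e3]
          rfl
      obtain ⟨hsh, hc⟩ := ih s i (j + 1) _ (by omega) hi0 his (by omega) hsP'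
      refine ⟨hsh, ?_⟩
      intro a b ha hb
      rw [hc a b ha hb, hcell a b ha hb]
      by_cases hai : (a : Int) = i
      · by_cases hbj : (b : Int) = j
        · have hO : ¬((a : Int) = i ∧ j + 1 ≤ (b : Int) ∧
              (if (a : Int) = i ∧ (b : Int) = j ∧ cellAt P a b = some (s * s)
               then some 0 else cellAt P a b) = some (s * s)) := by
            rintro ⟨-, e, -⟩; omega
          rw [if_neg hO]
          by_cases hPv : cellAt P a b = some (s * s)
          · rw [if_pos ⟨hai, hbj, hPv⟩, if_pos ⟨hai, by omega, hPv⟩]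
          · rw [if_neg (by rintro ⟨-, -, e⟩; exact hPv e),
              if_neg (by rintro ⟨-, -, e⟩; exact hPv e)]
        · have hC : ¬((a : Int) = i ∧ (b : Int) = j ∧ cellAt P a b = some (s * s)) := by
            rintro ⟨-, e, -⟩; exact hbj e
          rw [if_neg hC]
          have hiff : ((a : Int) = i ∧ j ≤ (b : Int) ∧ cellAt P a b = some (s * s)) ↔
              ((a : Int) = i ∧ j + 1 ≤ (b : Int) ∧ cellAt P a b = some (s * s)) := by
            constructor <;> rintro ⟨x, y, z⟩ <;> exact ⟨x, by omega, z⟩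
          simp only [hiff]
      · have hC : ¬((a : Int) = i ∧ (b : Int) = j ∧ cellAt P a b = some (s * s)) := by
          rintro ⟨e, -⟩; exact hai e
        rw [if_neg hC]
        have hO : ¬((a : Int) = i ∧ j + 1 ≤ (b : Int) ∧ cellAt P a b = some (s * s)) := by
          rintro ⟨e, -⟩; exact hai e
        have hT : ¬((a : Int) = i ∧ j ≤ (b : Int) ∧ cellAt P a b = some (s * s)) := by
          rintro ⟨e, -⟩; exact hai e
        rw [if_neg hO, if_neg hT]
    · rw [aZeroJ, dif_neg hj]
      refine ⟨hs, ?_⟩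
      intro a b ha hb
      rw [if_neg]
      rintro ⟨-, h2, -⟩
      omega

lemma zeroI_cells : ∀ (k : Nat) (s i : Int) (P : List (List Int)),
    (s - i).toNat ≤ k → 0 ≤ i → shapeS s P →
    shapeS s (aZeroI s i P) ∧
    ∀ a b : Nat, a < s.toNat → b < s.toNat →
      cellAt (aZeroI s i P) a b =
        if i ≤ (a : Int) ∧ cellAt P a b = some (s * s) then some 0
        else cellAt P a b := by
  intro k
  induction k with
  | zero =>
    intro s i P hk hi0 hs
    rw [aZeroI, dif_neg (by omega)]
    refine ⟨hs, ?_⟩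
    intro a b ha hb
    rw [if_neg]
    rintro ⟨h1, -⟩
    omega
  | succ k ih =>
    intro s i P hk hi0 hs
    by_cases hi : i < s
    · rw [aZeroI, dif_pos hi]
      obtain ⟨hsQ, hcQ⟩ := zeroJ_cells (s - 0).toNat s i 0 P le_rfl hi0 hi le_rfl hs
      obtain ⟨hsh, hc⟩ := ih s (i + 1) _ (by omega) (by omega) hsQ
      refine ⟨hsh, ?_⟩
      intro a b ha hb
      rw [hc a b ha hb, hcQ a b ha hb]
      by_cases hai : (a : Int) = i
      · rw [if_neg (by rintro ⟨e, -⟩; omega)]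
        by_cases hPv : cellAt P a b = some (s * s)
        · rw [if_pos ⟨hai, by omega, hPv⟩, if_pos ⟨by omega, hPv⟩]
        · rw [if_neg (by rintro ⟨-, -, e⟩; exact hPv e), if_neg (by rintro ⟨-, e⟩; exact hPv e)]
      · have hC : ¬((a : Int) = i ∧ (0 : Int) ≤ (b : Int) ∧ cellAt P a b = some (s * s)) := by
          rintro ⟨e, -⟩; exact hai e
        rw [if_neg hC]
        have hiff : (i ≤ (a : Int) ∧ cellAt P a b = some (s * s)) ↔
            (i + 1 ≤ (a : Int) ∧ cellAt P a b = some (s * s)) := by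
          constructor <;> rintro ⟨x, y⟩ <;> exact ⟨by omega, y⟩
        simp only [hiff]
    · rw [aZeroI, dif_neg hi]
      refine ⟨hs, ?_⟩
      intro a b ha hb
      rw [if_neg]
      rintro ⟨h1, -⟩
      omega

-- B's matrix pointwise -------------------------------------------------------

lemma alt_shape (s : Int) : shapeS s (Puzzle_goal_alt s) := by
  unfold Puzzle_goal_alt
  constructor
  · rw [List.length_map, PySem.List.length_pyRange_one]
    omega
  · intro a r hr
    rw [List.getElem?_map] at hr
    cases h : (PySem.List.pyRange 0 s 1)[a]? with
    | none => rw [h] at hr; cases hr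
    | some x =>
      rw [h] at hr
      simp only [Option.map_some, Option.some.injEq] at hr
      rw [← hr, List.length_map, PySem.List.length_pyRange_one]
      omega

lemma alt_cells (s : Int) (a b : Nat) (ha : a < s.toNat) (hb : b < s.toNat) :
    cellAt (Puzzle_goal_alt s) a b =
      some (if preVal s (a : Int) (b : Int) = s * s then 0
            else preVal s (a : Int) (b : Int)) := by
  unfold Puzzle_goal_alt cellAt
  rw [PySem.List.pyRange_one]
  simp only [List.map_map, List.getElem?_map]
  rw [List.getElem?_range (show a < (s - 0).toNat from by omega)]
  simp only [Option.map_some, Option.bind_some, Function.comp_apply, List.getElem?_map]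
  rw [List.getElem?_range (show b < (s - 0).toNat from by omega)]
  simp only [Option.map_some, Function.comp_apply, zero_add]

-- matrices with equal cells are equal ----------------------------------------

lemma eq_of_cellAt {s : Int} {P Q : List (List Int)} (hP : shapeS s P) (hQ : shapeS s Q)
    (h : ∀ a b : Nat, a < s.toNat → b < s.toNat → cellAt P a b = cellAt Q a b) : P = Q := by
  obtain ⟨hPl, hPr⟩ := hP
  obtain ⟨hQl, hQr⟩ := hQ
  apply List.ext_getElem (by omega)
  intro a h1 h2
  have hProw : P[a]? = some P[a] := List.getElem?_eq_getElem h1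
  have hQrow : Q[a]? = some Q[a] := List.getElem?_eq_getElem h2
  have hPrl := hPr a _ hProw
  have hQrl := hQr a _ hQrow
  apply List.ext_getElem (by omega)
  intro b hb1 hb2
  have e := h a b (by omega) (by omega)
  unfold cellAt at e
  rw [hProw, hQrow] at e
  simp only [Option.bind_some] at e
  rw [List.getElem?_eq_getElem hb1, List.getElem?_eq_getElem hb2] at e
  exact Option.some.inj e

-- initial matrix -------------------------------------------------------------

lemma init_shape (s : Int) :
    shapeS s ((PySem.List.pyRange 0 s 1).map (fun _ => List.replicate s.toNat (0 : Int))) := by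
  constructor
  · rw [List.length_map, PySem.List.length_pyRange_one]
    omega
  · intro a r hr
    rw [List.getElem?_map] at hr
    cases h : (PySem.List.pyRange 0 s 1)[a]? with
    | none => rw [h] at hr; cases hr
    | some x =>
      rw [h] at hr
      simp only [Option.map_some, Option.some.injEq] at hr
      rw [← hr, List.length_replicate]

-- the main theorem -----------------------------------------------------------

lemma main_eq (s : Int) : Puzzle_goal s = Puzzle_goal_alt s := by
  unfold Puzzle_goal
  dsimp only
  rw [PySem.List.foldl_append_singleton_eq_map, List.nil_append]
  by_cases hs : 1 ≤ s
  · have houter := outer_cells (s - 0).toNat s 0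
      ((PySem.List.pyRange 0 s 1).map (fun _ => List.replicate s.toNat (0 : Int)))
      le_rfl le_rfl (init_shape s)
    rw [show (4 * 0 * (s - 0) : Int) = 0 from by ring] at houter
    obtain ⟨hshM, hcM⟩ := houter
    obtain ⟨hshF, hcF⟩ := zeroI_cells (s - 0).toNat s 0 _ le_rfl le_rfl hshM
    apply eq_of_cellAt hshF (alt_shape s)
    intro a b ha hb
    rw [hcF a b ha hb, hcM a b ha hb, alt_cells s a b ha hb]
    have h0r : (0 : Int) ≤ rIdx s (a : Int) (b : Int) :=
      le_rIdx (by omega) (by omega) (by omega) (by omega)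
    rw [if_pos h0r]
    by_cases hv : preVal s (a : Int) (b : Int) = s * s
    · rw [if_pos ⟨by omega, by rw [hv]⟩, if_pos hv]
    · rw [if_neg (by rintro ⟨-, e⟩; exact hv (Option.some.inj e)), if_neg hv]
  · rw [PySem.List.pyRange_one_eq_nil (by omega)]
    simp only [List.map_nil]
    rw [aOuter, dif_neg (by omega)]
    dsimp only
    rw [aZeroI, dif_neg (by omega)]
    unfold Puzzle_goal_alt
    rw [PySem.List.pyRange_one_eq_nil (by omega)]
    rfl

-- ===== VERDICT =====
theorem Puzzle_goal_spec : Claim_equal_Puzzle_goal := by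
  intro size _
  unfold Spec_Puzzle_goal
  exact main_eq size
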